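-- pv_equiv track=rewrite | github.com/rjmendez/ai-hacklab-starter | scouts/iris_cantina_scout.py | derive_domain
-- ===== SOURCE A (Python) =====
-- def derive_domain(slug, app_package=None):
--     if slug.endswith("-firebaseio-com"):
--         return None
--     if app_package:
--         parts = app_package.split(".")
--         if len(parts) >= 2 and parts[0] in ("com","org","net","io","co"):
--             return f"{parts[1]}.{parts[0]}"
--     for tld in ["-com","-net","-org","-io","-co","-app","-dev"]:
--         if slug.endswith(tld):
--             return slug[:-len(tld)].rstrip("-") + tld.replace("-",".")
--     return None
-- ===== SOURCE B (Python) =====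
-- def derive_domain(slug, app_package=None):
--     if slug.endswith("-firebaseio-com"):
--         return None
--     if app_package:
--         parts = app_package.split(".")
--         if len(parts) >= 2 and parts[0] in ("com", "org", "net", "io", "co"):
--             return f"{parts[1]}.{parts[0]}"
--     head, sep, tld = slug.rpartition("-")
--     if sep and tld in {"com", "net", "org", "io", "co", "app", "dev"}:
--         return head.rstrip("-") + "." + tld
--     return None
-- ===== Notes on version B (the rewrite author's own statement) =====
-- stated objective: idiomatic
-- what changed: The seven-suffix endswith loop is replaced by a single rpartition on the slug's last dash followed by one set-membership test on the candidate TLD; the two top guards are kept verbatim.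
import Mathlib
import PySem

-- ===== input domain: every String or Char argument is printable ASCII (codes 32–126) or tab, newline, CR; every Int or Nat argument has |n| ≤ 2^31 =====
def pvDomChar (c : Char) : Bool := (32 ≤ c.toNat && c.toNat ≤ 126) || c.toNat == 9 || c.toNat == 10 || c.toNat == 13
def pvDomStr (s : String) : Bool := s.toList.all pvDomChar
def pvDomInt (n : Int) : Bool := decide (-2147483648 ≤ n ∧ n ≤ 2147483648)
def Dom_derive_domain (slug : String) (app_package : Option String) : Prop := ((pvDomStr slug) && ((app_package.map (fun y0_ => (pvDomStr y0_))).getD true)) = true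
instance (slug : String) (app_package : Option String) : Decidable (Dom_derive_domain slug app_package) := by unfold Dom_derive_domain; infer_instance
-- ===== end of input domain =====

-- B replaces A's seven-suffix endswith loop by a single rpartition on the last dash plus one
-- set-membership test; objective: idiomatic (same cost).

-- shared helper: exact port of Python's s.rstrip("-") (strip ALL trailing dashes);
-- both Pythons call .rstrip("-") verbatim
def rstripDash (cs : List Char) : List Char := (cs.reverse.dropWhile (· == '-')).reverse

-- shared helper: the app_package branch, verbatim identical in A and in B
-- (some d = the branch early-returns d, none = it falls through)
def appBranch (app_package : Option String) : Option String :=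
  match app_package with
  | none => none
  | some ap =>
    if ap = "" then none                      -- `if app_package:` — empty string is falsy
    else
      let parts := (PySem.Str.split? ap ".").getD []   -- split? = some … since sep ≠ ""
      if 2 ≤ parts.length ∧ parts.getD 0 "" ∈ (["com", "org", "net", "io", "co"] : List String) then
        some (parts.getD 1 "" ++ "." ++ parts.getD 0 "")
      else none

-- ===== PORT A =====
-- the `for tld in [...]` loop of A, over code points of slug
def tldLoopA (cs : List Char) : List String → Option String
  | [] => none
  | t :: rest =>
    if PySem.Chars.endswith cs t.toList then
      some (String.ofList (rstripDash (PySem.List.slice cs none (some (-(t.toList.length : Int)))))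
              ++ PySem.Str.replace t "-" ".")
    else tldLoopA cs rest

def derive_domain (slug : String) (app_package : Option String) : Option String :=
  if PySem.Str.endswith slug "-firebaseio-com" then none
  else
    match appBranch app_package with
    | some d => some d
    | none => tldLoopA slug.toList ["-com", "-net", "-org", "-io", "-co", "-app", "-dev"]

-- ===== PORT B =====
-- hand port of `head, sep, tld = slug.rpartition("-")` + the guarded return:
-- the split at the LAST '-' is computed on the reversed code-point list (exact)
def rpartitionBranch (cs : List Char) : Option String :=
  let r := cs.reverse
  let seg := r.takeWhile (· != '-')
  match r.dropWhile (· != '-') with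
  | [] => none                                -- no '-' in slug: sep == "" is falsy
  | _ :: headRev =>
    let tld := String.ofList seg.reverse
    if tld ∈ (["com", "net", "org", "io", "co", "app", "dev"] : List String) then
      some (String.ofList (rstripDash headRev.reverse) ++ "." ++ tld)
    else none

def derive_domain_alt (slug : String) (app_package : Option String) : Option String :=
  if PySem.Str.endswith slug "-firebaseio-com" then none
  else
    match appBranch app_package with
    | some d => some d
    | none => rpartitionBranch slug.toList

-- ===== PRECONDITION & SPEC =====
def Spec_derive_domain (slug : String) (app_package : Option String) (out : Option String) : Prop := out = derive_domain_alt slug app_package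
instance (slug : String) (app_package : Option String) (out : Option String) : Decidable (Spec_derive_domain slug app_package out) := by unfold Spec_derive_domain; infer_instance

-- ===== CLAIM (what is proved, stated in full; the proofs are below) =====
def Claim_equal_derive_domain : Prop := ∀ (slug : String) (app_package : Option String), Dom_derive_domain slug app_package → Spec_derive_domain slug app_package (derive_domain slug app_package)

-- ===== LEMMAS AND PROOFS =====

theorem dropWhile_head_false {α : Type} {p : α → Bool} : ∀ {l : List α} {a : α} {t : List α},
    l.dropWhile p = a :: t → p a = false := by
  intro l
  induction l with
  | nil => intro a t h; simp [List.dropWhile] at h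
  | cons x xs ih =>
    intro a t h
    by_cases hx : p x
    · rw [List.dropWhile_cons_of_pos hx] at h; exact ih h
    · rw [List.dropWhile_cons_of_neg hx] at h
      cases h; simpa using hx

-- two dash-free blocks before a dash must agree
theorem dashfree_eq : ∀ {a b x y : List Char},
    (∀ c ∈ a, (c != '-') = true) → (∀ c ∈ b, (c != '-') = true) →
    a ++ '-' :: x = b ++ '-' :: y → a = b ∧ x = y := by
  intro a
  induction a with
  | nil =>
    intro b x y _ hb h
    cases b with
    | nil => simpa using h
    | cons c bs =>
      simp at h
      exfalso
      have := hb c (by simp)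
      rw [← h.1] at this
      simp at this
  | cons c as ih =>
    intro b x y ha hb h
    cases b with
    | nil =>
      simp at h
      exfalso
      have := ha c (by simp)
      rw [h.1] at this
      simp at this
    | cons d bs =>
      simp at h
      obtain ⟨rfl, h2⟩ := h
      have := ih (fun c hc => ha c (by simp [hc])) (fun c hc => hb c (by simp [hc])) h2
      exact ⟨by simp [this.1], this.2⟩

-- A's "slug ends with -<tc>" test, characterized through the split of slug's reversed
-- code points at their first dash
theorem endswith_char {cs seg headRev : List Char} (tc : List Char)
    (hseg : ∀ c ∈ seg, (c != '-') = true) (htc : ∀ c ∈ tc, (c != '-') = true)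
    (hr : cs.reverse = seg ++ '-' :: headRev) :
    PySem.Chars.endswith cs ('-' :: tc) = true ↔ tc.reverse = seg := by
  rw [PySem.Chars.endswith_iff, ← List.reverse_prefix]
  constructor
  · intro h
    obtain ⟨u, hu⟩ := h
    rw [hr] at hu
    simp only [List.reverse_cons, List.append_assoc, List.singleton_append] at hu
    exact (dashfree_eq (a := tc.reverse) (b := seg)
      (fun c hc => htc c (by simpa using hc)) hseg hu).1
  · intro h
    refine ⟨headRev, ?_⟩
    rw [hr, ← h]
    simp

set_option maxRecDepth 8000 in
theorem loop_eq (cs : List Char) :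
    tldLoopA cs ["-com", "-net", "-org", "-io", "-co", "-app", "-dev"] = rpartitionBranch cs := by
  unfold rpartitionBranch
  cases hdrop : cs.reverse.dropWhile (· != '-') with
  | nil =>
    have hnomem : ('-' : Char) ∉ cs := by
      intro hmem
      have := (List.dropWhile_eq_nil_iff.mp hdrop) '-' (by simpa using hmem)
      simp at this
    have hends : ∀ t : List Char, '-' ∈ t → PySem.Chars.endswith cs t = false := by
      intro t ht
      cases hb : PySem.Chars.endswith cs t
      · rfl
      · exact absurd (((PySem.Chars.endswith_iff cs t).mp hb).mem ht) hnomem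
    simp only [tldLoopA]
    rw [hends "-com".toList (by simp),
        hends "-net".toList (by simp),
        hends "-org".toList (by simp),
        hends "-io".toList (by simp),
        hends "-co".toList (by simp),
        hends "-app".toList (by simp),
        hends "-dev".toList (by simp)]
    simp only [Bool.false_eq_true, if_false]
    rw [hdrop]
  | cons c headRev =>
    have hc : c = '-' := by
      have := dropWhile_head_false hdrop
      simpa using this
    subst hc
    have hr : cs.reverse = cs.reverse.takeWhile (· != '-') ++ '-' :: headRev := by
      conv_lhs => rw [← List.takeWhile_append_dropWhile (p := (· != '-')) (l := cs.reverse)]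
      rw [hdrop]
    set seg := cs.reverse.takeWhile (· != '-') with hsegdef
    have hseg : ∀ c ∈ seg, (c != '-') = true := fun c hc => List.mem_takeWhile_imp (p := (· != '-')) hc
    -- A's endswith tests, as decidable statements about seg
    have hE : ∀ tc : List Char, (∀ c ∈ tc, (c != '-') = true) →
        PySem.Chars.endswith cs ('-' :: tc) = decide (tc.reverse = seg) := by
      intro tc htc
      cases hb : PySem.Chars.endswith cs ('-' :: tc)
      · have : ¬ (tc.reverse = seg) := fun h => by
          rw [(endswith_char tc hseg htc hr).mpr h] at hb; cases hb
        simp [this]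
      · have := (endswith_char tc hseg htc hr).mp hb
        simp [this]
    -- slug as a concrete append, for computing A's slice
    have hcs : cs = headRev.reverse ++ '-' :: seg.reverse := by
      rw [← List.reverse_reverse cs, hr]
      simp
    have hslice : ∀ k : Nat, 0 < k → seg.length = k - 1 →
        PySem.List.slice cs none (some (-(k : Int))) = headRev.reverse := by
      intro k hk hsl
      rw [PySem.List.slice_to_neg_natCast cs k hk, hcs]
      have : (headRev.reverse ++ '-' :: seg.reverse).length - k = headRev.reverse.length := by
        simp; omega
      rw [this, List.take_left]
    -- B's membership tests, as the same statements about seg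
    have hofList : ∀ t : String, (String.ofList seg.reverse = t) ↔ (t.toList.reverse = seg) := by
      intro t
      constructor
      · intro h
        have := congrArg String.toList h
        simp at this
        rw [← this, List.reverse_reverse]
      · intro h
        rw [← h]
        simp
    simp only []
    rw [hdrop]
    simp only [← hsegdef, tldLoopA]
    rw [show ("-com".toList) = '-' :: "com".toList from rfl,
        show ("-net".toList) = '-' :: "net".toList from rfl,
        show ("-org".toList) = '-' :: "org".toList from rfl,
        show ("-io".toList) = '-' :: "io".toList from rfl,
        show ("-co".toList) = '-' :: "co".toList from rfl,
        show ("-app".toList) = '-' :: "app".toList from rfl,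
        show ("-dev".toList) = '-' :: "dev".toList from rfl]
    rw [hE "com".toList (by simp),
        hE "net".toList (by simp),
        hE "org".toList (by simp),
        hE "io".toList (by simp),
        hE "co".toList (by simp),
        hE "app".toList (by simp),
        hE "dev".toList (by simp)]
    simp only [List.mem_cons, List.not_mem_nil, or_false, hofList, decide_eq_true_eq]
    by_cases t1 : "com".toList.reverse = seg
    · rw [if_pos t1, if_pos (Or.inl t1),
          show (((('-' :: "com".toList).length : Nat)) : Int) = ((4 : Nat) : Int) from rfl,
          hslice 4 (by norm_num) (by rw [← t1]; rfl),
          show PySem.Str.replace "-com" "-" "." = ".com" from by decide,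
          (hofList "com").mpr t1, String.append_assoc,
          show ("." : String) ++ "com" = ".com" from rfl]
    · rw [if_neg t1]
      by_cases t2 : "net".toList.reverse = seg
      · rw [if_pos t2, if_pos (Or.inr (Or.inl t2)),
            show (((('-' :: "net".toList).length : Nat)) : Int) = ((4 : Nat) : Int) from rfl,
            hslice 4 (by norm_num) (by rw [← t2]; rfl),
            show PySem.Str.replace "-net" "-" "." = ".net" from by decide,
            (hofList "net").mpr t2, String.append_assoc,
            show ("." : String) ++ "net" = ".net" from rfl]
      · rw [if_neg t2]
        by_cases t3 : "org".toList.reverse = seg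
        · rw [if_pos t3, if_pos (Or.inr (Or.inr (Or.inl t3))),
              show (((('-' :: "org".toList).length : Nat)) : Int) = ((4 : Nat) : Int) from rfl,
              hslice 4 (by norm_num) (by rw [← t3]; rfl),
              show PySem.Str.replace "-org" "-" "." = ".org" from by decide,
              (hofList "org").mpr t3, String.append_assoc,
              show ("." : String) ++ "org" = ".org" from rfl]
        · rw [if_neg t3]
          by_cases t4 : "io".toList.reverse = seg
          · rw [if_pos t4, if_pos (Or.inr (Or.inr (Or.inr (Or.inl t4)))),
                show (((('-' :: "io".toList).length : Nat)) : Int) = ((3 : Nat) : Int) from rfl,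
                hslice 3 (by norm_num) (by rw [← t4]; rfl),
                show PySem.Str.replace "-io" "-" "." = ".io" from by decide,
                (hofList "io").mpr t4, String.append_assoc,
                show ("." : String) ++ "io" = ".io" from rfl]
          · rw [if_neg t4]
            by_cases t5 : "co".toList.reverse = seg
            · rw [if_pos t5, if_pos (Or.inr (Or.inr (Or.inr (Or.inr (Or.inl t5))))),
                  show (((('-' :: "co".toList).length : Nat)) : Int) = ((3 : Nat) : Int) from rfl,
                  hslice 3 (by norm_num) (by rw [← t5]; rfl),
                  show PySem.Str.replace "-co" "-" "." = ".co" from by decide,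
                  (hofList "co").mpr t5, String.append_assoc,
                  show ("." : String) ++ "co" = ".co" from rfl]
            · rw [if_neg t5]
              by_cases t6 : "app".toList.reverse = seg
              · rw [if_pos t6, if_pos (Or.inr (Or.inr (Or.inr (Or.inr (Or.inr (Or.inl t6)))))),
                    show (((('-' :: "app".toList).length : Nat)) : Int) = ((4 : Nat) : Int) from rfl,
                    hslice 4 (by norm_num) (by rw [← t6]; rfl),
                    show PySem.Str.replace "-app" "-" "." = ".app" from by decide,
                    (hofList "app").mpr t6, String.append_assoc,
                    show ("." : String) ++ "app" = ".app" from rfl]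
              · rw [if_neg t6]
                by_cases t7 : "dev".toList.reverse = seg
                · rw [if_pos t7, if_pos (Or.inr (Or.inr (Or.inr (Or.inr (Or.inr (Or.inr t7)))))),
                      show (((('-' :: "dev".toList).length : Nat)) : Int) = ((4 : Nat) : Int) from rfl,
                      hslice 4 (by norm_num) (by rw [← t7]; rfl),
                      show PySem.Str.replace "-dev" "-" "." = ".dev" from by decide,
                      (hofList "dev").mpr t7, String.append_assoc,
                      show ("." : String) ++ "dev" = ".dev" from rfl]
                · rw [if_neg t7, if_neg (by rintro (h | h | h | h | h | h | h)
                      <;> first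
                        | exact t1 h | exact t2 h | exact t3 h | exact t4 h
                        | exact t5 h | exact t6 h | exact t7 h)]

-- ===== VERDICT (by name: the statement is the Claim_ definition above) =====
theorem derive_domain_spec : Claim_equal_derive_domain := by
  intro slug app_package _
  unfold Spec_derive_domain derive_domain derive_domain_alt
  split
  · rfl
  · cases appBranch app_package with
    | some d => rfl
    | none => simpa using loop_eq slug.toList
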